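-- pv_equiv track=rewrite | github.com/sl-m-lab/Internet-Argument-Corpus | v2/bitbucket repo/iacorpus/initialization/quote_finder.py | _suffix_tree_index_to_real_index
-- ===== SOURCE A (Python) =====
-- def _suffix_tree_index_to_real_index(stree_index, texts):
--     # TODO: currently O(n), should be O(log(n)) or less. profile before optimizing
--     curr = stree_index
--     for index, text in enumerate(texts):
--         text_len = len(text)
--         if curr < text_len:
--             return index, curr
--         else:
--             curr -= text_len + 1
--     assert False
-- ===== SOURCE B (Python) =====
-- def _suffix_tree_index_to_real_index(stree_index, texts):
--     # Precompute start/end offset tables in one pass, then binary-search the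
--     # strictly increasing end table for the smallest k with stree_index < ends[k].
--     starts = []
--     ends = []
--     pos = 0
--     for text in texts:
--         starts.append(pos)
--         ends.append(pos + len(text))
--         pos += len(text) + 1
--     lo, hi = 0, len(ends)
--     while lo < hi:
--         mid = (lo + hi) // 2
--         if stree_index < ends[mid]:
--             hi = mid
--         else:
--             lo = mid + 1
--     assert lo < len(ends)
--     return lo, stree_index - starts[lo]
-- ===== Notes on version B (the rewrite author's own statement) =====
-- stated objective: alternative
-- what changed: Replaces A's linear subtract-scan over texts with a one-pass precomputed start/end offset table followed by a binary search over the strictly increasing end offsets.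
import Mathlib
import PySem

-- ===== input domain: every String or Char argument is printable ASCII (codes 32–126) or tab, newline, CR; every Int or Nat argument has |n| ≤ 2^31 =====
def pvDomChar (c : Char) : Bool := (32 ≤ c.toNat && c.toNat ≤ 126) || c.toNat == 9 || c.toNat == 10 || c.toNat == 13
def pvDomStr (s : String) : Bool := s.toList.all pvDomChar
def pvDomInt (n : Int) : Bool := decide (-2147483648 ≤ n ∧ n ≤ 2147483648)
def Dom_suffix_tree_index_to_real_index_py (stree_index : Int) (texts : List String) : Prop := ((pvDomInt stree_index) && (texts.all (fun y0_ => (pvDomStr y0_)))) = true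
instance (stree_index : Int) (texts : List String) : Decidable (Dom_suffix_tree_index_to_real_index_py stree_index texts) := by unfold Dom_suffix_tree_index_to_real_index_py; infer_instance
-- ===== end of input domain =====

-- B replaces A's linear subtract-scan by a precomputed start/end offset table plus
-- a binary search over the strictly increasing end table (objective: alternative).

-- ===== PORT A =====
-- the for loop over enumerate(texts), carrying curr and index; [] is the
-- unreachable `assert False` (excluded by Pre_), where the port returns (0, 0)
def pvLoopA (curr index : Int) : List String → Int × Int
  | [] => (0, 0)
  | t :: rest =>
      let text_len : Int := PySem.Str.len t
      if curr < text_len then (index, curr)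
      else pvLoopA (curr - (text_len + 1)) (index + 1) rest

def suffix_tree_index_to_real_index_py (stree_index : Int) (texts : List String) : Int × Int :=
  pvLoopA stree_index 0 texts

-- ===== PORT B =====
-- the one-pass loop building the parallel `starts` and `ends` tables with running `pos`
def pvBuildB (pos : Int) : List String → List Int × List Int
  | [] => ([], [])
  | t :: rest =>
      let l : Int := PySem.Str.len t
      let p := pvBuildB (pos + l + 1) rest
      (pos :: p.1, (pos + l) :: p.2)

-- the while loop: binary search for the smallest lo with stree_index < ends[lo]
def pvBsearch (s : Int) (ends : List Int) (lo hi : Nat) : Nat :=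
  if lo < hi then
    let mid := (lo + hi) / 2
    if s < ends.getD mid 0 then pvBsearch s ends lo mid
    else pvBsearch s ends (mid + 1) hi
  else lo
termination_by hi - lo
decreasing_by all_goals omega

def suffix_tree_index_to_real_index_py_alt (stree_index : Int) (texts : List String) : Int × Int :=
  let p := pvBuildB 0 texts
  let lo := pvBsearch stree_index p.2 0 p.2.length
  ((lo : Int), stree_index - p.1.getD lo 0)

-- ===== PRECONDITION & SPEC =====
-- Pre_: exactly where A returns (otherwise A reaches `assert False` and raises):
-- texts nonempty and stree_index strictly below the total concatenated length
-- (sum of len(text)+1 over all texts, minus the trailing separator).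
def Pre_suffix_tree_index_to_real_index_py (stree_index : Int) (texts : List String) : Prop :=
  texts ≠ [] ∧ stree_index < (texts.map (fun t => PySem.Str.len t + 1)).sum - 1
instance (stree_index : Int) (texts : List String) : Decidable (Pre_suffix_tree_index_to_real_index_py stree_index texts) := by unfold Pre_suffix_tree_index_to_real_index_py; infer_instance

def pvWitness_suffix_tree_index_to_real_index_py : Int × List String := (5, ["ab", "cde"])

def Spec_suffix_tree_index_to_real_index_py (stree_index : Int) (texts : List String) (out : Int × Int) : Prop := out = suffix_tree_index_to_real_index_py_alt stree_index texts
instance (stree_index : Int) (texts : List String) (out : Int × Int) : Decidable (Spec_suffix_tree_index_to_real_index_py stree_index texts out) := by unfold Spec_suffix_tree_index_to_real_index_py; infer_instance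

-- ===== CLAIM (what is proved, stated in full; the proofs are below) =====
def Claim_equal_suffix_tree_index_to_real_index_py : Prop := ∀ (stree_index : Int) (texts : List String), Dom_suffix_tree_index_to_real_index_py stree_index texts → Pre_suffix_tree_index_to_real_index_py stree_index texts → Spec_suffix_tree_index_to_real_index_py stree_index texts (suffix_tree_index_to_real_index_py stree_index texts)

-- ===== LEMMAS AND PROOFS =====

-- start offset of text k and end offset of text k in the concatenation
def pvStart (ts : List String) (k : Nat) : Int :=
  ((ts.take k).map (fun t => PySem.Str.len t + 1)).sum

def pvEnd (ts : List String) (k : Nat) : Int :=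
  pvStart ts k + PySem.Str.len (ts.getD k "")

theorem pvStart_cons (t : String) (rest : List String) (k : Nat) :
    pvStart (t :: rest) (k + 1) = (PySem.Str.len t + 1) + pvStart rest k := by
  simp [pvStart]

theorem pvEnd_cons (t : String) (rest : List String) (k : Nat) :
    pvEnd (t :: rest) (k + 1) = (PySem.Str.len t + 1) + pvEnd rest k := by
  simp [pvEnd, pvStart_cons]; ring

theorem pvEnd_lt_succ (ts : List String) (k : Nat) (hk : k + 1 < ts.length) :
    pvEnd ts k < pvEnd ts (k + 1) := by
  induction ts generalizing k with
  | nil => simp at hk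
  | cons t rest ih =>
      cases k with
      | zero =>
          cases rest with
          | nil => simp at hk
          | cons u rs =>
              simp [pvEnd, pvStart, PySem.Str.len]
              have : (0:Int) ≤ u.toList.length := by positivity
              omega
      | succ k' =>
          have := ih k' (by simpa using hk)
          rw [pvEnd_cons, pvEnd_cons]
          omega

theorem pvEnd_mono (ts : List String) (j k : Nat) :
    j ≤ k → k < ts.length → pvEnd ts j ≤ pvEnd ts k := by
  induction k with
  | zero =>
      intro hjk _
      have hj : j = 0 := by omega
      simp [hj]
  | succ k' ih =>
      intro hjk hk
      rcases Nat.lt_or_ge j (k' + 1) with h | h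
      · have h1 := ih (by omega) (by omega)
        have h2 := pvEnd_lt_succ ts k' hk
        omega
      · have hj : j = k' + 1 := by omega
        simp [hj]

theorem pvEnd_last (ts : List String) (h : ts ≠ []) :
    pvEnd ts (ts.length - 1) = (ts.map (fun t => PySem.Str.len t + 1)).sum - 1 := by
  induction ts with
  | nil => simp at h
  | cons t rest ih =>
      cases rest with
      | nil => simp [pvEnd, pvStart]
      | cons u rs =>
          have h' : (u :: rs) ≠ [] := by simp
          have := ih h'
          have hlen : (t :: u :: rs).length - 1 = ((u :: rs).length - 1) + 1 := by
            simp
          rw [hlen, pvEnd_cons, this]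
          simp
          ring

-- A's loop returns (index + K, curr - start K) for K the least index with curr < end K
theorem pvLoopA_eq (ts : List String) (curr index : Int) (K : Nat)
    (hK : K < ts.length) (hlt : curr < pvEnd ts K)
    (hmin : ∀ j, j < K → pvEnd ts j ≤ curr) :
    pvLoopA curr index ts = (index + (K : Int), curr - pvStart ts K) := by
  induction ts generalizing curr index K with
  | nil => simp at hK
  | cons t rest ih =>
      cases K with
      | zero =>
          have h0 : curr < PySem.Str.len t := by
            simpa [pvEnd, pvStart] using hlt
          simp only [pvLoopA]
          rw [if_pos h0]
          simp [pvStart]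
      | succ K' =>
          have hnot : ¬ curr < PySem.Str.len t := by
            have := hmin 0 (by omega)
            simpa [pvEnd, pvStart] using this
          rw [pvEnd_cons] at hlt
          have := ih (curr - (PySem.Str.len t + 1)) (index + 1) K'
            (by simpa using hK) (by omega)
            (fun j hj => by
              have := hmin (j + 1) (by omega)
              rw [pvEnd_cons] at this; omega)
          simp only [pvLoopA]
          rw [if_neg hnot, this, pvStart_cons, Prod.mk.injEq]
          constructor
          · push_cast; ring
          · ring

-- the tables built by B's first loop
theorem pvBuildB_fst_getD (ts : List String) (pos : Int) (k : Nat) (hk : k < ts.length) :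
    (pvBuildB pos ts).1.getD k 0 = pos + pvStart ts k := by
  induction ts generalizing pos k with
  | nil => simp at hk
  | cons t rest ih =>
      cases k with
      | zero => simp [pvBuildB, pvStart]
      | succ k' =>
          simp only [pvBuildB, List.getD_cons_succ]
          rw [ih (pos + PySem.Str.len t + 1) k' (by simpa using hk), pvStart_cons]
          ring

theorem pvBuildB_snd_getD (ts : List String) (pos : Int) (k : Nat) (hk : k < ts.length) :
    (pvBuildB pos ts).2.getD k 0 = pos + pvEnd ts k := by
  induction ts generalizing pos k with
  | nil => simp at hk
  | cons t rest ih =>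
      cases k with
      | zero => simp [pvBuildB, pvEnd, pvStart]
      | succ k' =>
          simp only [pvBuildB, List.getD_cons_succ]
          rw [ih (pos + PySem.Str.len t + 1) k' (by simpa using hk), pvEnd_cons]
          ring

theorem pvBuildB_snd_length (ts : List String) (pos : Int) :
    (pvBuildB pos ts).2.length = ts.length := by
  induction ts generalizing pos with
  | nil => simp [pvBuildB]
  | cons t rest ih => simp [pvBuildB, ih]

-- the binary search finds the least K with s < ends[K]
theorem pvBsearch_eq (s : Int) (ends : List Int) (K : Nat)
    (hmono : ∀ j k, j ≤ k → k < ends.length → ends.getD j 0 ≤ ends.getD k 0)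
    (hKlt : s < ends.getD K 0)
    (hKmin : ∀ j, j < K → ends.getD j 0 ≤ s) :
    ∀ lo hi, lo ≤ K → K ≤ hi → hi ≤ ends.length →
      pvBsearch s ends lo hi = K := by
  intro lo hi
  induction hn : hi - lo using Nat.strong_induction_on generalizing lo hi with
  | _ n ih =>
      intro hloK hKhi hhilen
      by_cases hlt : lo < hi
      · rw [pvBsearch, if_pos hlt]
        set mid := (lo + hi) / 2 with hmid
        have hmidlo : lo ≤ mid := by omega
        have hmidhi : mid < hi := by omega
        by_cases hcmp : s < ends.getD mid 0
        · have hKmid : K ≤ mid := by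
            by_contra h
            have := hKmin mid (by omega)
            omega
          rw [if_pos hcmp]
          exact ih (mid - lo) (by omega) lo mid rfl hloK hKmid (by omega)
        · have hKmid : mid + 1 ≤ K := by
            by_contra h
            have h1 : K ≤ mid := by omega
            have := hmono K mid h1 (by omega)
            omega
          rw [if_neg hcmp]
          exact ih (hi - (mid + 1)) (by omega) (mid + 1) hi rfl hKmid hKhi hhilen
      · rw [pvBsearch, if_neg hlt]
        omega

-- ===== VERDICT (by name: the statement is the Claim_ definition above) =====
theorem suffix_tree_index_to_real_index_py_spec : Claim_equal_suffix_tree_index_to_real_index_py := by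
  intro s ts _ hpre
  obtain ⟨hne, hs⟩ := hpre
  have hlen : 0 < ts.length := List.length_pos_of_ne_nil hne
  have hex : ∃ k, k < ts.length ∧ s < pvEnd ts k := by
    refine ⟨ts.length - 1, by omega, ?_⟩
    rw [pvEnd_last ts hne]; omega
  have hfl : Nat.find hex < ts.length := (Nat.find_spec hex).1
  have hKmin : ∀ j, j < Nat.find hex → pvEnd ts j ≤ s := by
    intro j hj
    have hnot := Nat.find_min hex hj
    by_contra hcon
    exact hnot ⟨by omega, by omega⟩
  obtain ⟨hKlen, hKlt⟩ := Nat.find_spec hex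
  generalize hg : Nat.find hex = K at hKlen hKlt hKmin
  -- evaluate A
  have hA : suffix_tree_index_to_real_index_py s ts = ((K : Int), s - pvStart ts K) := by
    unfold suffix_tree_index_to_real_index_py
    rw [pvLoopA_eq ts s 0 K hKlen hKlt hKmin]
    simp
  -- evaluate B
  have hB : suffix_tree_index_to_real_index_py_alt s ts = ((K : Int), s - pvStart ts K) := by
    unfold suffix_tree_index_to_real_index_py_alt
    have hends_len : (pvBuildB 0 ts).2.length = ts.length := pvBuildB_snd_length ts 0
    have hsearch : pvBsearch s (pvBuildB 0 ts).2 0 (pvBuildB 0 ts).2.length = K := by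
      apply pvBsearch_eq s (pvBuildB 0 ts).2 K
      · intro j k hjk hk
        rw [pvBuildB_snd_getD ts 0 j (by omega), pvBuildB_snd_getD ts 0 k (by omega)]
        have := pvEnd_mono ts j k hjk (by omega)
        omega
      · rw [pvBuildB_snd_getD ts 0 K (by omega)]; omega
      · intro j hj
        rw [pvBuildB_snd_getD ts 0 j (by omega)]
        have := hKmin j hj; omega
      · omega
      · omega
      · omega
    simp only [hsearch]
    rw [pvBuildB_fst_getD ts 0 K (by omega)]
    simp
  unfold Spec_suffix_tree_index_to_real_index_py
  rw [hA, hB]
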